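-- pv_equiv track=rewrite | github.com/alrud0x0/stock_game | batch/batch/update_stock.py | compare_stocks
-- ===== SOURCE A (Python) =====
-- def compare_stocks(old_dicts, new_dicts):
--     codes = list(old_dicts.keys())
--     while codes:
--         code = codes.pop()
--         if code in new_dicts:
--             del new_dicts[code]
--         else:
--             del old_dicts[code]
--
--     return old_dicts, new_dicts
-- ===== SOURCE B (Python) =====
-- def compare_stocks(old_dicts, new_dicts):
--     # Compute the shared keys once, then do two independent delete passes.
--     common = old_dicts.keys() & new_dicts.keys()
--     for code in list(old_dicts):
--         if code not in common:
--             del old_dicts[code]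
--     for code in list(new_dicts):
--         if code in common:
--             del new_dicts[code]
--     return old_dicts, new_dicts
-- ===== Notes on version B (the rewrite author's own statement) =====
-- stated objective: simpler
-- what changed: A interleaves the decision inside one destructive while/pop loop over old's keys, deleting from whichever dict loses; B precomputes the shared key set once and runs two independent straight-line delete passes, one per dict.
import Mathlib
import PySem

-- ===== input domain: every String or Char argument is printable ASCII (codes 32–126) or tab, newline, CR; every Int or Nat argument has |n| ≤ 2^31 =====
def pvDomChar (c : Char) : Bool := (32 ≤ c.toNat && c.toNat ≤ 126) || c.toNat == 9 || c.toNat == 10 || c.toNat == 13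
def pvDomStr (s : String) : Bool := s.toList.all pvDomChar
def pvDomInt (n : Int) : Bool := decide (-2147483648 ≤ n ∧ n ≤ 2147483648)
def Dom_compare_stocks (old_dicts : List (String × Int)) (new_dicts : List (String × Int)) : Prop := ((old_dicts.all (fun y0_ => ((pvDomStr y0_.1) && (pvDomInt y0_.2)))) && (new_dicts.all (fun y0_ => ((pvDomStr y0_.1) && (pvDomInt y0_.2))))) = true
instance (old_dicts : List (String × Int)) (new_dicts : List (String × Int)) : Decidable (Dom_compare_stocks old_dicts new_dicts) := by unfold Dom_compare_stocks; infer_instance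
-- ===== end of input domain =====

-- B changes the decomposition: A's single while/pop loop deleting from either dict becomes a
-- precomputed shared-key set plus two independent delete passes (same cost; 'simpler').
-- Both A and B mutate the argument dicts in place; the equivalence proved here is about the
-- returned pair, whose final contents coincide with the mutated dicts in both programs.

-- ===== PORT A =====
-- while codes: code = codes.pop(); … — pop takes the LAST element, so the loop consumes
-- codes back-to-front; we recurse over codes.reverse, consuming the head = the popped element.
def compare_stocks_while (o n : PySem.Dict String Int) : List String → PySem.Dict String Int × PySem.Dict String Int
  | [] => (o, n)
  | code :: rest =>
      if n.contains code then compare_stocks_while o (n.erase code) rest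
      else compare_stocks_while (o.erase code) n rest

def compare_stocks (old_dicts : List (String × Int)) (new_dicts : List (String × Int)) : (List (String × Int)) × (List (String × Int)) :=
  let od := PySem.Dict.ofList old_dicts
  let nd := PySem.Dict.ofList new_dicts
  let codes := od.keys
  let r := compare_stocks_while od nd codes.reverse
  (r.1.items, r.2.items)

-- ===== PORT B =====
def compare_stocks_alt (old_dicts : List (String × Int)) (new_dicts : List (String × Int)) : (List (String × Int)) × (List (String × Int)) :=
  let od := PySem.Dict.ofList old_dicts
  let nd := PySem.Dict.ofList new_dicts
  let common := PySem.Set.ofList (od.keys.filter (fun k => nd.contains k))  -- old.keys() & new.keys()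
  let o := od.keys.foldl (fun d code => if common.contains code then d else d.erase code) od
  let n := nd.keys.foldl (fun d code => if common.contains code then d.erase code else d) nd
  (o.items, n.items)

-- ===== PRECONDITION & SPEC =====
def Spec_compare_stocks (old_dicts : List (String × Int)) (new_dicts : List (String × Int)) (out : (List (String × Int)) × (List (String × Int))) : Prop := out = compare_stocks_alt old_dicts new_dicts
instance (old_dicts : List (String × Int)) (new_dicts : List (String × Int)) (out : (List (String × Int)) × (List (String × Int))) : Decidable (Spec_compare_stocks old_dicts new_dicts out) := by unfold Spec_compare_stocks; infer_instance

-- ===== CLAIM (what is proved, stated in full; the proofs are below) =====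
def Claim_equal_compare_stocks : Prop := ∀ (old_dicts : List (String × Int)) (new_dicts : List (String × Int)), Dom_compare_stocks old_dicts new_dicts → Spec_compare_stocks old_dicts new_dicts (compare_stocks old_dicts new_dicts)

-- ===== LEMMAS AND PROOFS =====

-- B's first pass: "delete every key failing P" is a filter of the items.
-- B's second pass (foldl_erase_if): "delete every key satisfying P" is likewise a filter.
-- A's while loop (compare_stocks_while_eq): on a duplicate-free code list it filters both dicts at once.
lemma foldl_erase_unless (P : String → Bool) (codes : List String) :
    ∀ (d : PySem.Dict String Int),
    (codes.foldl (fun d c => if P c then d else d.erase c) d).items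
      = d.items.filter (fun p => !(!(P p.1) && codes.contains p.1)) := by
  induction codes with
  | nil => intro d; simp
  | cons c rest ih =>
    intro d
    by_cases hc : P c = true
    · simp only [List.foldl_cons, if_pos hc]
      rw [ih d]
      apply List.filter_congr
      intro p _
      by_cases h : p.1 = c
      · simp [h, hc]
      · simp [h]
    · simp only [List.foldl_cons, if_neg hc]
      rw [ih (d.erase c)]
      show ((d.items.filter _).filter _) = _
      rw [List.filter_filter]
      apply List.filter_congr
      intro p _
      by_cases h : p.1 = c
      · simp [h, hc]
      · simp [h]

lemma foldl_erase_if (P : String → Bool) (codes : List String) :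
    ∀ (d : PySem.Dict String Int),
    (codes.foldl (fun d c => if P c then d.erase c else d) d).items
      = d.items.filter (fun p => !(P p.1 && codes.contains p.1)) := by
  induction codes with
  | nil => intro d; simp
  | cons c rest ih =>
    intro d
    by_cases hc : P c = true
    · simp only [List.foldl_cons, if_pos hc]
      rw [ih (d.erase c)]
      show ((d.items.filter _).filter _) = _
      rw [List.filter_filter]
      apply List.filter_congr
      intro p _
      by_cases h : p.1 = c
      · simp [h, hc]
      · simp [h]
    · simp only [List.foldl_cons, if_neg hc]
      rw [ih d]
      apply List.filter_congr
      intro p _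
      by_cases h : p.1 = c
      · simp [h, hc]
      · simp [h]

lemma compare_stocks_while_eq (codes : List String) :
    ∀ (o n : PySem.Dict String Int), codes.Nodup →
    compare_stocks_while o n codes =
      (⟨o.items.filter (fun p => !(codes.contains p.1 && !(n.contains p.1)))⟩,
       ⟨n.items.filter (fun p => !(codes.contains p.1))⟩) := by
  induction codes with
  | nil => intro o n _; simp [compare_stocks_while]
  | cons c rest ih =>
    intro o n hnd
    have hcr : c ∉ rest := (List.nodup_cons.mp hnd).1
    have hrest : rest.Nodup := (List.nodup_cons.mp hnd).2
    by_cases hc : n.contains c = true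
    · simp only [compare_stocks_while, if_pos hc]
      rw [ih o (n.erase c) hrest]
      refine Prod.ext ?_ ?_ <;> simp only
      · apply PySem.Dict.ext; simp only
        apply List.filter_congr
        intro p _
        by_cases h : p.1 = c
        · have : rest.contains p.1 = false := by
            simp [h]; exact fun hm => absurd hm hcr
          simp [h, hc]
          exact Or.inl hcr
        · have : (n.erase c).contains p.1 = n.contains p.1 := by
            simp only [PySem.Dict.erase, PySem.Dict.contains, List.any_filter]
            refine List.any_congr rfl ?_
            intro q
            by_cases hq : q.1 = c <;> simp [hq, Ne.symm h]
          simp [this, h]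
      · apply PySem.Dict.ext; simp only
        show ((n.items.filter _).filter _) = _
        rw [List.filter_filter]
        apply List.filter_congr
        intro p _
        by_cases h : p.1 = c
        · have : rest.contains p.1 = false := by
            simp [h]; exact fun hm => absurd hm hcr
          simp [h]
        · simp [h]
    · simp only [compare_stocks_while, if_neg hc]
      rw [ih (o.erase c) n hrest]
      refine Prod.ext ?_ ?_ <;> simp only
      · apply PySem.Dict.ext; simp only
        show ((o.items.filter _).filter _) = _
        rw [List.filter_filter]
        apply List.filter_congr
        intro p _
        by_cases h : p.1 = c
        · simp [h, hc]
        · simp [h]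
      · apply PySem.Dict.ext; simp only
        apply List.filter_congr
        intro p hp
        by_cases h : p.1 = c
        · exfalso
          have : n.contains c = true := by
            simp only [PySem.Dict.contains, List.any_eq_true]
            exact ⟨p, hp, by simp [h]⟩
          exact hc this
        · simp [h]

-- ===== VERDICT (by name: the statement is the Claim_ definition above) =====
theorem compare_stocks_spec : Claim_equal_compare_stocks := by
  intro old_dicts new_dicts _
  unfold Spec_compare_stocks
  unfold compare_stocks compare_stocks_alt
  simp only
  set od := PySem.Dict.ofList old_dicts with hod
  set nd := PySem.Dict.ofList new_dicts with hnd
  set common := PySem.Set.ofList (od.keys.filter (fun k => nd.contains k)) with hcommon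
  have hnodup : od.keys.reverse.Nodup := by
    rw [List.nodup_reverse]; exact PySem.Dict.nodup_keys_ofList old_dicts
  rw [compare_stocks_while_eq _ od nd hnodup,
      foldl_erase_unless (fun k => common.contains k) od.keys od,
      foldl_erase_if (fun k => common.contains k) nd.keys nd]
  have hcomm : ∀ x, x ∈ common ↔ (x ∈ od.keys ∧ x ∈ nd.keys) := by
    intro x
    rw [hcommon, PySem.Set.mem_ofList, List.mem_filter]
    simp [PySem.Dict.contains_eq_decide_mem_keys]
  refine Prod.ext ?_ ?_ <;> simp only
  · apply List.filter_congr
    intro p hp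
    have hk : p.1 ∈ od.keys := List.mem_map.mpr ⟨p, hp, rfl⟩
    by_cases hn : p.1 ∈ nd.keys
    · have hcm : p.1 ∈ common := (hcomm _).mpr ⟨hk, hn⟩
      simp [PySem.Dict.contains_eq_decide_mem_keys, hk, hn, hcm]
    · have hcm : p.1 ∉ common := fun h => hn ((hcomm _).mp h).2
      simp [PySem.Dict.contains_eq_decide_mem_keys, hk, hn, hcm]
  · apply List.filter_congr
    intro p hp
    have hn : p.1 ∈ nd.keys := List.mem_map.mpr ⟨p, hp, rfl⟩
    by_cases ho : p.1 ∈ od.keys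
    · have hcm : p.1 ∈ common := (hcomm _).mpr ⟨ho, hn⟩
      simp [hn, ho, hcm]
    · have hcm : p.1 ∉ common := fun h => ho ((hcomm _).mp h).1
      simp [hn, ho, hcm]
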